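-- pv_equiv track=rewrite | github.com/Guyberco/legislation-location-tagger | src/DataBase.py | buildWordThatHasLocTags
-- ===== SOURCE A (Python) =====
-- def checkTagInColumns(columns, findWord):
--     """
--     :param columns: list of strings
--     :param findWord: string to lookup
--     :return: true if string is in the list
--     """
--     for word in columns:
--         if findWord == word:
--             return True
--     return False
--
-- def buildWordThatHasLocTags(list, indx):
--     """
--     check if the given list of strings (represents an entry in the NRE output) is a location
--     returns true the 4th element is "properName", the word(first element) is contained in the loc dictionary
--     and contains an element "I_LOC" (should be located from the 4th index)
--     :param columns: list of strings
--     :return: indx - the next line to check, aggregatedWord loc key to put , aggregatedWordToTag - word to tag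
--     if not found both aggregatedWord, aggregatedWordToTag are ""
--     """
--     aggregatedWord = ''
--     aggregatedWordToTag = ''
--     i = indx
--     while i < len(list):
--         columns = list[i].split()
--         i += 1
--         if len(columns) < 3:
--             continue
--         wordAsInText = columns[3]
--         wordToTag = columns[1]
--         if checkTagInColumns(columns, "I_LOC") and checkTagInColumns(columns, "properName"):
--             if not (i-1 == indx or wordAsInText == '-' or (len(aggregatedWord)>1 and aggregatedWord[-1] == '-')):
--                 aggregatedWord += " "
--                 aggregatedWordToTag += " "
--             aggregatedWord += wordAsInText
--             aggregatedWordToTag += wordToTag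
--         else:
--             break
--     return (i, aggregatedWord, aggregatedWordToTag)
-- ===== SOURCE B (Python) =====
-- def buildWordThatHasLocTags(list, indx):
--     # Pass 1: scan lines and collect (is-first-line, text-word, tag-word) tokens.
--     tokens = []
--     i = indx
--     n = len(list)
--     while i < n:
--         columns = list[i].split()
--         i += 1
--         if len(columns) < 3:
--             continue
--         if "I_LOC" in columns and "properName" in columns:
--             tokens.append((i - 1 == indx, columns[3], columns[1]))
--         else:
--             break
--     # Pass 2: fold the tokens into the two aggregated strings.
--     aggregatedWord = ''
--     aggregatedWordToTag = ''
--     for first, wordAsInText, wordToTag in tokens: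
--         if not (first or wordAsInText == '-' or (len(aggregatedWord) > 1 and aggregatedWord[-1] == '-')):
--             aggregatedWord += ' '
--             aggregatedWordToTag += ' '
--         aggregatedWord += wordAsInText
--         aggregatedWordToTag += wordToTag
--     return (i, aggregatedWord, aggregatedWordToTag)
-- ===== Notes on version B (the rewrite author's own statement) =====
-- stated objective: alternative
-- what changed: B splits A's single stateful while-loop into two passes: a scan that only collects (is-first-line, columns[3], columns[1]) tokens and the next line index, then a separate fold over the collected tokens that builds the two aggregated strings with the same separator rule.
import Mathlib
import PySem

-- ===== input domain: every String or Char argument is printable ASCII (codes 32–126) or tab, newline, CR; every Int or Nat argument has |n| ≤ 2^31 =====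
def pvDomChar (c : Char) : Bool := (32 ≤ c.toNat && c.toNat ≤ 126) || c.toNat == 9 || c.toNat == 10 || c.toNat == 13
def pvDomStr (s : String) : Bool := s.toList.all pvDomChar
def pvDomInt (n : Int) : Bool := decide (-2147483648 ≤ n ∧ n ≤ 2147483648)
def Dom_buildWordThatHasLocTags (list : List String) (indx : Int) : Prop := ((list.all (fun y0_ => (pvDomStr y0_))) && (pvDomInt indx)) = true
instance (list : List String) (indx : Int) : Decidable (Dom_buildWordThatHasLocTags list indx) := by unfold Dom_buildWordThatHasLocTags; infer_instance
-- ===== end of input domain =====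

-- B re-decomposes A's single stateful scan into a token-collecting pass plus a separate
-- string-building fold (objective: alternative; same asymptotic cost).


-- ===== PORT A =====
def checkTagInColumns (columns : List String) (findWord : String) : Bool :=
  match columns with
  | [] => false
  | word :: rest => if findWord == word then true else checkTagInColumns rest findWord

-- A's while-loop; string accumulators kept as List Char (PySem string convention).
-- On the paths where Python A raises IndexError (pyGet? = none) the returned value is
-- irrelevant: those inputs lie outside Pre_.
def goA (list : List String) (indx : Int) (i : Int) (aw awt : List Char) :
    Int × List Char × List Char :=
  if _h : i < (list.length : Int) then
    match PySem.List.pyGet? list i with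
    | none => (i, aw, awt)              -- IndexError in Python (i < -len); outside Pre_
    | some line =>
      if (PySem.Str.split₀ line).length < 3 then
        goA list indx (i + 1) aw awt    -- continue
      else
        match PySem.List.pyGet? (PySem.Str.split₀ line) 3,
              PySem.List.pyGet? (PySem.Str.split₀ line) 1 with
        | some wordAsInText, some wordToTag =>
          if checkTagInColumns (PySem.Str.split₀ line) "I_LOC" &&
             checkTagInColumns (PySem.Str.split₀ line) "properName" then
            if i == indx || wordAsInText == "-" ||
               (decide (1 < aw.length) && (PySem.List.pyGet? aw (-1) == some '-')) then
              goA list indx (i + 1) (aw ++ wordAsInText.toList) (awt ++ wordToTag.toList)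
            else
              goA list indx (i + 1) (aw ++ ' ' :: wordAsInText.toList)
                                    (awt ++ ' ' :: wordToTag.toList)
          else (i + 1, aw, awt)         -- break
        | _, _ => (i + 1, aw, awt)      -- IndexError (exactly 3 columns); outside Pre_
  else (i, aw, awt)
termination_by ((list.length : Int) - i).toNat
decreasing_by all_goals omega

def buildWordThatHasLocTags (list : List String) (indx : Int) : Int × String × String :=
  ((goA list indx indx [] []).1,
   String.ofList (goA list indx indx [] []).2.1,
   String.ofList (goA list indx indx [] []).2.2)

-- ===== PORT B =====
-- Pass 1: collect (is-first-line, columns[3], columns[1]) tokens and the final index.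
def collectLocTokens (list : List String) (indx : Int) (i : Int) :
    Int × List (Bool × String × String) :=
  if _h : i < (list.length : Int) then
    match PySem.List.pyGet? list i with
    | none => (i, [])                   -- IndexError in Python; outside Pre_
    | some line =>
      if (PySem.Str.split₀ line).length < 3 then
        collectLocTokens list indx (i + 1)
      else if (PySem.Str.split₀ line).contains "I_LOC" &&
              (PySem.Str.split₀ line).contains "properName" then
        match PySem.List.pyGet? (PySem.Str.split₀ line) 3,
              PySem.List.pyGet? (PySem.Str.split₀ line) 1 with
        | some wordAsInText, some wordToTag =>
          ((collectLocTokens list indx (i + 1)).1,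
           (i == indx, wordAsInText, wordToTag) :: (collectLocTokens list indx (i + 1)).2)
        | _, _ => (i + 1, [])           -- IndexError; outside Pre_
      else (i + 1, [])                  -- break
  else (i, [])
termination_by ((list.length : Int) - i).toNat
decreasing_by all_goals omega

-- Pass 2: fold the tokens into the two aggregated strings.
def foldLocTokens (toks : List (Bool × String × String)) (acc : List Char × List Char) :
    List Char × List Char :=
  toks.foldl
    (fun acc t =>
      if t.1 || t.2.1 == "-" ||
         (decide (1 < acc.1.length) && (PySem.List.pyGet? acc.1 (-1) == some '-')) then
        (acc.1 ++ t.2.1.toList, acc.2 ++ t.2.2.toList)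
      else
        (acc.1 ++ ' ' :: t.2.1.toList, acc.2 ++ ' ' :: t.2.2.toList))
    acc

def buildWordThatHasLocTags_alt (list : List String) (indx : Int) : Int × String × String :=
  ((collectLocTokens list indx indx).1,
   String.ofList (foldLocTokens (collectLocTokens list indx indx).2 ([], [])).1,
   String.ofList (foldLocTokens (collectLocTokens list indx indx).2 ([], [])).2)

-- ===== PRECONDITION & SPEC =====
-- A line lets A's scan continue: fewer than 3 columns, or ≥ 4 columns carrying both tags.
def pvContLine (s : String) : Bool :=
  decide ((PySem.Str.split₀ s).length < 3) ||
  (decide (4 ≤ (PySem.Str.split₀ s).length) &&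
   (PySem.Str.split₀ s).contains "I_LOC" && (PySem.Str.split₀ s).contains "properName")

-- Pre_ excludes (a) negative indx — a line index outside the function's natural domain, where
-- Python's negative-index wraparound makes A re-read lines from the end (A still returns there;
-- see the cited example, on which B returns the same value) — and (b) inputs whose scan from
-- indx reaches a line with exactly 3 whitespace-separated columns, on which A raises
-- IndexError (columns[3]).
def Pre_buildWordThatHasLocTags (list : List String) (indx : Int) : Prop :=
  0 ≤ indx ∧
  ∀ j : Nat, j < list.length → indx ≤ (j : Int) →
    (PySem.Str.split₀ (list.getD j "")).length = 3 →
    ∃ k : Nat, k < j ∧ indx ≤ (k : Int) ∧ pvContLine (list.getD k "") = false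

instance (list : List String) (indx : Int) : Decidable (Pre_buildWordThatHasLocTags list indx) := by
  unfold Pre_buildWordThatHasLocTags; infer_instance

def pvWitness_buildWordThatHasLocTags : List String × Int :=
  (["a b c Word I_LOC properName"], 0)

def Spec_buildWordThatHasLocTags (list : List String) (indx : Int) (out : Int × String × String) : Prop := out = buildWordThatHasLocTags_alt list indx
instance (list : List String) (indx : Int) (out : Int × String × String) : Decidable (Spec_buildWordThatHasLocTags list indx out) := by unfold Spec_buildWordThatHasLocTags; infer_instance

-- ===== CLAIM (what is proved, stated in full; the proofs are below) =====
def Claim_equal_buildWordThatHasLocTags : Prop := ∀ (list : List String) (indx : Int), Dom_buildWordThatHasLocTags list indx → Pre_buildWordThatHasLocTags list indx → Spec_buildWordThatHasLocTags list indx (buildWordThatHasLocTags list indx)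

-- ===== LEMMAS AND PROOFS =====
theorem checkTag_eq_contains (columns : List String) (w : String) :
    checkTagInColumns columns w = columns.contains w := by
  induction columns with
  | nil => rfl
  | cons x xs ih =>
    show (if w == x then true else checkTagInColumns xs w) = _
    rw [List.contains_cons, ih]
    by_cases h : w = x
    · simp [h]
    · simp [h]

theorem goA_eq_collect_fold (list : List String) (indx : Int) (i : Int) (hi : 0 ≤ i)
    (hsafe : ∀ j : Nat, j < list.length → i ≤ (j : Int) →
      (PySem.Str.split₀ (list.getD j "")).length = 3 →
      ∃ k : Nat, k < j ∧ i ≤ (k : Int) ∧ pvContLine (list.getD k "") = false)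
    (aw awt : List Char) :
    goA list indx i aw awt =
      ((collectLocTokens list indx i).1,
        foldLocTokens (collectLocTokens list indx i).2 (aw, awt)) := by
  rw [goA, collectLocTokens]
  by_cases h : i < (list.length : Int)
  · simp only [dif_pos h]
    have hlt : i.toNat < list.length := by omega
    have hget : PySem.List.pyGet? list i = some (list.getD i.toNat "") := by
      rw [PySem.List.pyGet?_of_nonneg list hi]
      simp [List.getD, List.getElem?_eq_getElem hlt]
    rw [hget]
    have hsafe' : (PySem.Str.split₀ (list.getD i.toNat "")).length < 3 ∨
        4 ≤ (PySem.Str.split₀ (list.getD i.toNat "")).length := by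
      rcases Nat.lt_or_ge (PySem.Str.split₀ (list.getD i.toNat "")).length 3 with h' | h'
      · exact Or.inl h'
      rcases Nat.lt_or_ge (PySem.Str.split₀ (list.getD i.toNat "")).length 4 with h'' | h''
      · exfalso
        obtain ⟨k, hk, hik, _⟩ := hsafe i.toNat hlt (by omega) (by omega)
        omega
      · exact Or.inr h''
    by_cases hcols : (PySem.Str.split₀ (list.getD i.toNat "")).length < 3
    · simp only [if_pos hcols]
      apply goA_eq_collect_fold list indx (i + 1) (by omega)
      intro j hj hij h3
      obtain ⟨k, hkj, hik, hk⟩ := hsafe j hj (by omega) h3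
      refine ⟨k, hkj, ?_, hk⟩
      by_cases hki : k = i.toNat
      · exfalso
        have hct : pvContLine (list.getD i.toNat "") = true := by
          simp only [pvContLine, decide_eq_true hcols, Bool.true_or]
        rw [hki, hct] at hk
        exact Bool.noConfusion hk
      · omega
    · simp only [if_neg hcols]
      have h4 : 4 ≤ (PySem.Str.split₀ (list.getD i.toNat "")).length := by
        rcases hsafe' with h' | h'
        · omega
        · exact h'
      have hg3 : PySem.List.pyGet? (PySem.Str.split₀ (list.getD i.toNat "")) 3 =
          some ((PySem.Str.split₀ (list.getD i.toNat ""))[3]'(by omega)) := by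
        rw [show (3 : Int) = ((3 : Nat) : Int) from rfl,
            PySem.List.pyGet?_ofNat _ 3 (by omega)]
      have hg1 : PySem.List.pyGet? (PySem.Str.split₀ (list.getD i.toNat "")) 1 =
          some ((PySem.Str.split₀ (list.getD i.toNat ""))[1]'(by omega)) := by
        rw [show (1 : Int) = ((1 : Nat) : Int) from rfl,
            PySem.List.pyGet?_ofNat _ 1 (by omega)]
      rw [hg3, hg1]
      rw [checkTag_eq_contains, checkTag_eq_contains]
      by_cases htags : ((PySem.Str.split₀ (list.getD i.toNat "")).contains "I_LOC" &&
          (PySem.Str.split₀ (list.getD i.toNat "")).contains "properName") = true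
      · simp only [htags, if_pos]
        have hnext : ∀ j : Nat, j < list.length → i + 1 ≤ (j : Int) →
            (PySem.Str.split₀ (list.getD j "")).length = 3 →
            ∃ k : Nat, k < j ∧ i + 1 ≤ (k : Int) ∧ pvContLine (list.getD k "") = false := by
          intro j hj hij h3
          obtain ⟨k, hkj, hik, hk⟩ := hsafe j hj (by omega) h3
          refine ⟨k, hkj, ?_, hk⟩
          by_cases hki : k = i.toNat
          · exfalso
            have hct : pvContLine (list.getD i.toNat "") = true := by
              simp only [Bool.and_eq_true] at htags
              simp only [pvContLine, decide_eq_true h4, htags.1, htags.2, Bool.and_self, Bool.or_true]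
            rw [hki, hct] at hk
            exact Bool.noConfusion hk
          · omega
        rw [goA_eq_collect_fold list indx (i + 1) (by omega) hnext,
            goA_eq_collect_fold list indx (i + 1) (by omega) hnext]
        simp only [foldLocTokens, List.foldl_cons]
        split_ifs with hsep <;> rfl
      · simp only [htags, if_neg, Bool.false_eq_true, not_false_iff]
        simp [foldLocTokens]
  · simp only [dif_neg h]
    simp [foldLocTokens]
termination_by ((list.length : Int) - i).toNat
decreasing_by all_goals omega

theorem buildWordThatHasLocTags_spec : Claim_equal_buildWordThatHasLocTags := by
  intro list indx _ hpre
  unfold Spec_buildWordThatHasLocTags buildWordThatHasLocTags buildWordThatHasLocTags_alt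
  rw [goA_eq_collect_fold list indx indx hpre.1 hpre.2]
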